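-- pv_equiv track=rewrite | github.com/SelenayBulut/Hamming_SEC_DED_Code_Simulator | index.py | calculate_hamming
-- ===== SOURCE A (Python) =====
-- def calculate_hamming(data_bits):
--     m = len(data_bits)  # Kullanıcıdan alınan veri bitlerinin sayısı
--     r = 0  # Gereken parite bitlerinin sayısı
--
--     # r değerini bul: 2^r ≥ m + r + 1 olacak şekilde r'yi artır
--     while (2 ** r) < (m + r + 1):
--         r += 1
--
--     # Toplam uzunluk = veri bitleri + parite bitleri + genel parite
--     # 1-index'li liste oluşturuyoruz (0. indeks kullanılmaz)
--     hamming = ['0'] * (m + r + 1)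
--
--     j = 0  # Veri bitlerini yerleştirmek için indeks
--     for i in range(1, len(hamming)):
--         # 2'nin kuvveti olan pozisyonlar parite biti olarak ayrılmıştır
--         if i & (i - 1) == 0:
--             continue
--         # Veri bitlerini parite bitleri harici yerlere sırayla yerleştir
--         hamming[i] = data_bits[j]
--         j += 1
--
--     # Her parite biti için kendisine bağlı bitleri kontrol ederek değeri hesapla
--     for i in range(r):
--         parity_pos = 2 ** i  # Parite bitinin bulunduğu pozisyon
--         count = 0
--         for j in range(1, len(hamming)):
--             if j & parity_pos:
--                 count += int(hamming[j])  # İlgili bit '1' ise say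
--         hamming[parity_pos] = str(count % 2)  # Tek/çift sayısına göre parite 0 ya da 1 olur
--
--     # Genel parite (overall parity): Tüm bitlerin toplamı tek mi çift mi kontrol et
--     total_ones = sum(int(bit) for bit in hamming[1:])
--     overall_parity = str(total_ones % 2)  # 1'lerin toplamı tekse 1, çiftse 0
--
--     # Parite + veri bitleri + genel parite şeklinde kodu döndür
--     return ''.join(hamming[1:]) + overall_parity
-- ===== SOURCE B (Python) =====
-- def calculate_hamming(data_bits):
--     m = len(data_bits)
--     r = 0
--     while (2 ** r) < (m + r + 1):
--         r += 1
--     n = m + r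
--
--     # data bits live at the non-power-of-two positions 1..n, in order
--     positions = [i for i in range(1, n + 1) if i & (i - 1) != 0]
--     pairs = list(zip(positions, (int(b) for b in data_bits)))
--
--     # one accumulation pass over the data bits instead of one rescan per parity bit
--     counts = [0] * r
--     for i, v in pairs:
--         for k in range(r):
--             if (i >> k) & 1:
--                 counts[k] += v
--     parity = [str(c % 2) for c in counts]
--
--     bits = iter(data_bits)
--     pieces = [parity[i.bit_length() - 1] if i & (i - 1) == 0 else next(bits)
--               for i in range(1, n + 1)]
--
--     overall = (sum(c % 2 for c in counts) + sum(v for _, v in pairs)) % 2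
--     return ''.join(pieces) + str(overall)
-- ===== Notes on version B (the rewrite author's own statement) =====
-- stated objective: alternative
-- what changed: B never builds or mutates the hamming array: it pairs each data bit (parsed by int() once) with its non-power-of-two position, accumulates all r parity counts in one pass over those pairs instead of rescanning and re-parsing every position for each parity bit, and assembles the output string in a single final pass.
import Mathlib
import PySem

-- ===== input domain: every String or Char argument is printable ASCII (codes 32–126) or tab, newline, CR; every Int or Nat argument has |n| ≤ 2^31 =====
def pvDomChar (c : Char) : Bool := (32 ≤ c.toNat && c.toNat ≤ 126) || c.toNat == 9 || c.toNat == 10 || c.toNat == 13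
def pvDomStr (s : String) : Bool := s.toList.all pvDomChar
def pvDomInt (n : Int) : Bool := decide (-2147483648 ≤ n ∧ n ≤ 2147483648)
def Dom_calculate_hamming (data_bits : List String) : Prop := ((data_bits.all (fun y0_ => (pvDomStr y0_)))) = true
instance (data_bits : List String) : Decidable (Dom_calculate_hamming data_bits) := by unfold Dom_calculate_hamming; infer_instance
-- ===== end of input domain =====

-- B replaces A's mutate-an-array-and-rescan-it-per-parity-bit pipeline by one accumulation
-- pass over (position, value) pairs; equivalence of the RETURN value is proved on all inputs
-- whose bits int() accepts (elsewhere the Python A raises ValueError).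

-- ===== PORT A =====
-- the 'while (2 ** r) < (m + r + 1): r += 1' loop; fuel m + 2 always suffices (see findR_A_spec)
def findR_A (m : Nat) : Nat → Nat → Nat
  | 0, r => r
  | f + 1, r => if 2 ^ r < m + r + 1 then findR_A m f (r + 1) else r

def calculate_hamming (data_bits : List String) : String :=
  let m := data_bits.length
  let r := findR_A m (m + 2) 0
  let hamming0 : List String := List.replicate (m + r + 1) "0"
  let placed := (List.range' 1 (m + r)).foldl
      (fun (st : List String × Nat) i =>
        if i &&& (i - 1) == 0 then st
        else (st.1.set i (data_bits.getD st.2 "0"), st.2 + 1)) (hamming0, 0)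
  let hamming := (List.range r).foldl
      (fun h i =>
        let p := 2 ^ i
        let count := (List.range' 1 (m + r)).foldl
            (fun (c : Int) j => if j &&& p != 0 then c + ((PySem.Int.ofStr? (h.getD j "0")).getD 0) else c) 0
        h.set p (PySem.Int.toStr (PySem.Int.mod count 2))) placed.1
  let total := (hamming.drop 1).foldl (fun (c : Int) s => c + ((PySem.Int.ofStr? s).getD 0)) 0
  PySem.Str.join "" (hamming.drop 1) ++ PySem.Int.toStr (PySem.Int.mod total 2)

-- ===== PORT B =====
def calculate_hamming_alt (data_bits : List String) : String :=
  let m := data_bits.length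
  let r := findR_A m (m + 2) 0
  let n := m + r
  let positions := (List.range' 1 n).filter (fun i => i &&& (i - 1) != 0)
  let pairs := positions.zip (data_bits.map (fun b => (PySem.Int.ofStr? b).getD 0))
  let counts := pairs.foldl
      (fun (cs : List Int) iv =>
        (List.range r).foldl
          (fun cs k => if (iv.1 >>> k) &&& 1 == 1 then cs.set k (cs.getD k 0 + iv.2) else cs) cs)
      (List.replicate r 0)
  let parity := counts.map (fun c => PySem.Int.toStr (PySem.Int.mod c 2))
  -- i.bit_length() - 1 of a position i ≥ 1 is Nat.log2 i
  let pieces := ((List.range' 1 n).foldl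
      (fun (st : List String × List String) i =>
        if i &&& (i - 1) == 0 then (st.1 ++ [parity.getD (Nat.log2 i) "0"], st.2)
        else (st.1 ++ [st.2.headD "0"], st.2.tail)) ([], data_bits)).1
  let overall := counts.foldl (fun (a : Int) c => a + PySem.Int.mod c 2) 0
      + pairs.foldl (fun (a : Int) iv => a + iv.2) 0
  PySem.Str.join "" pieces ++ PySem.Int.toStr (PySem.Int.mod overall 2)

-- ===== PRECONDITION & SPEC =====
-- Pre_ excludes exactly the inputs where Python A raises ValueError: a bit string int() rejects.
def Pre_calculate_hamming (data_bits : List String) : Prop :=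
  ∀ s ∈ data_bits, (PySem.Int.ofStr? s).isSome = true
instance (data_bits : List String) : Decidable (Pre_calculate_hamming data_bits) := by
  unfold Pre_calculate_hamming; infer_instance
def pvWitness_calculate_hamming : List String := (["1", "0", "1", "1"])

def Spec_calculate_hamming (data_bits : List String) (out : String) : Prop := out = calculate_hamming_alt data_bits
instance (data_bits : List String) (out : String) : Decidable (Spec_calculate_hamming data_bits out) := by unfold Spec_calculate_hamming; infer_instance

-- ===== CLAIM (what is proved, stated in full; the proofs are below) =====
def Claim_equal_calculate_hamming : Prop := ∀ (data_bits : List String), Dom_calculate_hamming data_bits → Pre_calculate_hamming data_bits → Spec_calculate_hamming data_bits (calculate_hamming data_bits)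

-- ===== LEMMAS AND PROOFS =====

-- abbreviations for the proofs: power-of-two test, its negation, int() with default,
-- the rank of a data position, and the value functions the two pipelines realise
def pvPw (i : Nat) : Bool := i &&& (i - 1) == 0
def pvNp (i : Nat) : Bool := i &&& (i - 1) != 0
def pvIv (s : String) : Int := (PySem.Int.ofStr? s).getD 0
def pvRnk (j : Nat) : Nat := (List.range' 1 (j - 1)).countP (fun i => i &&& (i - 1) != 0)
def pvG1 (ds : List String) (j : Nat) : String := if pvPw j then "0" else ds.getD (pvRnk j) "0"
def pvCval (ds : List String) (n k : Nat) : Int :=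
  ((List.range' 1 n).map (fun j => if j &&& 2 ^ k != 0 then pvIv (pvG1 ds j) else 0)).sum
def pvPstr (ds : List String) (n k : Nat) : String :=
  PySem.Int.toStr (PySem.Int.mod (pvCval ds n k) 2)
def pvGS (ds : List String) (n i j : Nat) : String :=
  if pvPw j && decide (Nat.log2 j < i) then pvPstr ds n (Nat.log2 j) else pvG1 ds j
def pvSsum (pr : List (Nat × Int)) (k : Nat) : Int :=
  ((pr.filter (fun iv => (iv.1 >>> k) &&& 1 == 1)).map (·.2)).sum

theorem two_mul_le_two_pow (m : Nat) : 2 * m + 3 ≤ 2 ^ (m + 2) := by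
  induction m with
  | zero => decide
  | succ m ih => have : 2 ^ (m + 2) ≥ 1 := Nat.one_le_two_pow; rw [pow_succ]; omega

theorem findR_go (m : Nat) : ∀ f r₀, r₀ + f = m + 2 → (∀ l, l < r₀ → 2 ^ l < m + l + 1) →
    (∀ l, l < findR_A m f r₀ → 2 ^ l < m + l + 1) ∧ m + findR_A m f r₀ + 1 ≤ 2 ^ (findR_A m f r₀) := by
  intro f
  induction f with
  | zero =>
    intro r₀ h hall
    simp only [findR_A]
    refine ⟨hall, ?_⟩
    have := two_mul_le_two_pow m
    have hr : r₀ = m + 2 := by omega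
    subst hr; omega
  | succ f ih =>
    intro r₀ h hall
    simp only [findR_A]
    split
    · exact ih (r₀ + 1) (by omega) (by
        intro l hl
        rcases Nat.lt_succ_iff_lt_or_eq.mp hl with hl | hl
        · exact hall l hl
        · subst hl; assumption)
    · exact ⟨hall, by omega⟩

theorem findR_A_spec (m : Nat) :
    (∀ l, l < findR_A m (m + 2) 0 → 2 ^ l < m + l + 1) ∧
      m + findR_A m (m + 2) 0 + 1 ≤ 2 ^ (findR_A m (m + 2) 0) := by
  exact findR_go m (m + 2) 0 (by omega) (by omega)

-- bit-twiddling facts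
theorem and_two_pow_ne (j k : Nat) : (j &&& 2 ^ k != 0) = j.testBit k := by
  rw [Nat.and_two_pow]
  rcases h : j.testBit k <;> simp

theorem shift_and_one (j k : Nat) : ((j >>> k) &&& 1 == 1) = j.testBit k := by
  simp only [Nat.testBit, Nat.and_one_is_mod]
  rcases h : (j >>> k) % 2 with _ | t
  · simp [h]
  · have : t = 0 := by omega
    subst this; simp [h]

theorem pvPw_two_pow (k : Nat) : pvPw (2 ^ k) = true := by
  have : 2 ^ k &&& (2 ^ k - 1) = 0 := by
    apply Nat.eq_of_testBit_eq; intro t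
    simp only [Nat.testBit_and, Nat.testBit_two_pow, Nat.testBit_two_pow_sub_one, Nat.zero_testBit]
    by_cases h : k = t <;> simp_all
  simp [pvPw, this]

theorem testBit_of_between (x k : Nat) (h1 : 2 ^ k ≤ x) (h2 : x < 2 ^ (k + 1)) : x.testBit k = true := by
  rw [Nat.testBit_eq_decide_div_mod_eq]
  have hx : x / 2 ^ k = 1 := by
    apply Nat.div_eq_of_lt_le <;> simp [pow_succ] at h2 ⊢ <;> omega
  simp [hx]

theorem pvPw_eq_two_pow_log2 (j : Nat) (h1 : 1 ≤ j) (hp : pvPw j = true) : j = 2 ^ Nat.log2 j := by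
  by_contra hne
  have hk1 : 2 ^ Nat.log2 j ≤ j := Nat.log2_self_le (by omega)
  have hk2 : j < 2 ^ (Nat.log2 j + 1) := Nat.lt_log2_self
  have hj : 2 ^ Nat.log2 j + 1 ≤ j := by omega
  have h1 : j.testBit (Nat.log2 j) = true := testBit_of_between _ _ hk1 hk2
  have h2 : (j - 1).testBit (Nat.log2 j) = true := testBit_of_between _ _ (by omega) (by omega)
  have h0 : (j &&& (j - 1)).testBit (Nat.log2 j) = true := by
    rw [Nat.testBit_and, h1, h2]; rfl
  have : j &&& (j - 1) = 0 := by simpa [pvPw] using hp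
  rw [this] at h0
  simp at h0

-- set on a mapped range'
theorem set_map_range' {α : Type} (f : Nat → α) (s n q : Nat) (v : α) (_hq : q < n) :
    ((List.range' s n).map f).set q v = (List.range' s n).map (fun j => if j = s + q then v else f j) := by
  apply List.ext_getElem
  · simp
  · intro i hi1 hi2
    simp only [List.length_set, List.length_map, List.length_range'] at hi1
    rw [List.getElem_set]
    simp only [List.getElem_map, List.getElem_range']
    split
    · next h => subst h; simp
    · next h =>
      have : ¬(1 * i + s = s + q) := by omega
      simp only [one_mul] at *
      rw [if_neg (by omega)]

theorem cons_map_getD {α : Type} (z d : α) (g : Nat → α) (n j : Nat) (h1 : 1 ≤ j) (h2 : j ≤ n) :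
    (z :: (List.range' 1 n).map g).getD j d = g j := by
  have hj : j < n + 1 := by omega
  rw [List.getD_eq_getElem _ _ (by simp; omega)]
  rcases j with _ | j
  · omega
  · simp only [List.getElem_cons_succ, List.getElem_map, List.getElem_range']
    congr 1
    omega

-- the power-of-two positions of 1..n are exactly 2^0..2^(r-1)
theorem filter_pw_eq : ∀ (r n : Nat), (∀ l, l < r → 2 ^ l ≤ n) → n < 2 ^ r →
    (List.range' 1 n).filter (fun i => i &&& (i - 1) == 0) = (List.range r).map (2 ^ ·) := by
  intro r
  induction r with
  | zero =>
    intro n _ hhi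
    have : n = 0 := by omega
    subst this; rfl
  | succ r ih =>
    intro n hlow hhi
    have h2r : 2 ^ r ≤ n := hlow r (by omega)
    have hsplit : List.range' 1 (2 ^ r - 1) ++ List.range' (2 ^ r) (n - 2 ^ r + 1) = List.range' 1 n := by
      have := @List.range'_append 1 (2 ^ r - 1) (n - 2 ^ r + 1) 1
      simp only [one_mul] at this
      rw [show 1 + (2 ^ r - 1) = 2 ^ r by have : 1 ≤ 2 ^ r := Nat.one_le_two_pow; omega] at this
      rw [show 2 ^ r - 1 + (n - 2 ^ r + 1) = n by omega] at this
      exact this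
    rw [← hsplit, List.filter_append]
    have hleft : (List.range' 1 (2 ^ r - 1)).filter (fun i => i &&& (i - 1) == 0)
        = (List.range r).map (2 ^ ·) := by
      apply ih
      · intro l hl
        have h1 : 2 ^ l < 2 ^ r := Nat.pow_lt_pow_right (by omega) hl
        omega
      · have : 1 ≤ 2 ^ r := Nat.one_le_two_pow
        omega
    have hright : (List.range' (2 ^ r) (n - 2 ^ r + 1)).filter (fun i => i &&& (i - 1) == 0)
        = [2 ^ r] := by
      rw [show n - 2 ^ r + 1 = (n - 2 ^ r) + 1 by omega, List.range'_succ, List.filter_cons]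
      have hpw := pvPw_two_pow r
      simp only [pvPw] at hpw
      rw [if_pos (by simpa using hpw)]
      have : (List.range' (2 ^ r + 1) (n - 2 ^ r)).filter (fun i => i &&& (i - 1) == 0) = [] := by
        rw [List.filter_eq_nil_iff]
        intro j hj
        rw [List.mem_range'_1] at hj
        intro hpj
        have hj1 : 1 ≤ j := by omega
        have : j = 2 ^ Nat.log2 j := pvPw_eq_two_pow_log2 j hj1 (by simpa [pvPw] using hpj)
        have hlt : Nat.log2 j < r + 1 := (Nat.log2_lt (by omega)).mpr (by omega)
        have hge : r ≤ Nat.log2 j := (Nat.le_log2 (by omega)).mpr (by omega)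
        have : j = 2 ^ r := by rw [this]; congr 1; omega
        omega
      rw [this]
    rw [hleft, hright, List.range_succ, List.map_append]
    rfl

-- the idx-th data position has rank idx
theorem rnk_filter_idx : ∀ (n : Nat) (idx : Nat) (h : idx < ((List.range' 1 n).filter pvNp).length),
    pvRnk (((List.range' 1 n).filter pvNp)[idx]) = idx := by
  intro n
  induction n with
  | zero => intro idx h; simp at h
  | succ n ih =>
    intro idx h
    have hsplit : List.range' 1 (n + 1) = List.range' 1 n ++ [n + 1] := by
      have h0 := List.range'_concat (s := 1) (n := n) (step := 1)
      simp only [Nat.one_mul] at h0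
      rw [h0]
      simp [Nat.add_comm]
    simp only [hsplit, List.filter_append] at h ⊢
    by_cases hidx : idx < ((List.range' 1 n).filter pvNp).length
    · rw [List.getElem_append_left hidx]
      exact ih idx hidx
    · have hlen : idx < ((List.range' 1 n).filter pvNp).length + ([n + 1].filter pvNp).length := by
        simpa using h
      have hnp : pvNp (n + 1) = true := by
        rcases hh : pvNp (n + 1) with _ | _
        · simp [List.filter, hh] at hlen; omega
        · rfl
      have hsing : [n + 1].filter pvNp = [n + 1] := by simp [List.filter, hnp]
      simp only [hsing] at h ⊢
      have hidx' : idx = ((List.range' 1 n).filter pvNp).length := by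
        simp at h; omega
      subst hidx'
      rw [List.getElem_append_right (by omega)]
      simp only [Nat.sub_self, List.getElem_cons_zero]
      show pvRnk (n + 1) = _
      unfold pvRnk
      simp only [Nat.add_sub_cancel]
      rw [List.countP_eq_length_filter]
      rfl

theorem length_filter_np (r n : Nat) (hlow : ∀ l, l < r → 2 ^ l ≤ n) (hhi : n < 2 ^ r) :
    ((List.range' 1 n).filter pvNp).length = n - r := by
  have hpw : ((List.range' 1 n).filter (fun i => i &&& (i - 1) == 0)).length = r := by
    rw [filter_pw_eq r n hlow hhi]; simp
  have htot := List.length_eq_length_filter_add (l := List.range' 1 n) (fun i => i &&& (i - 1) == 0)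
  have hnp : (List.range' 1 n).filter pvNp
      = (List.range' 1 n).filter (fun a => !(a &&& (a - 1) == 0)) := by
    apply List.filter_congr; intro a _; rfl
  simp only [List.length_range'] at htot
  rw [hnp]
  omega

theorem sum_if_filter (l : List Nat) (c : Nat → Bool) (x : Nat → Int) :
    ((l.map fun j => if c j then x j else 0).sum) = ((l.filter c).map x).sum := by
  induction l with
  | nil => rfl
  | cons j l ih =>
    rw [List.map_cons, List.filter_cons]
    rcases h : c j with _ | _ <;> simp [h, ih]

theorem sum_split (l : List Nat) (p : Nat → Bool) (a b : Nat → Int) :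
    ((l.map fun j => if p j then a j else b j).sum)
      = ((l.filter p).map a).sum + ((l.filter (fun j => !p j)).map b).sum := by
  induction l with
  | nil => rfl
  | cons j l ih =>
    rw [List.map_cons, List.filter_cons, List.filter_cons]
    rcases h : p j with _ | _ <;> simp [h, ih] <;> ring

theorem zipsum (full : List Int) (cond : Nat → Bool) :
    ∀ (ps : List Nat) (t : Nat), t + ps.length ≤ full.length →
      (∀ idx (h : idx < ps.length), pvRnk ps[idx] = t + idx) →
      (((ps.zip (full.drop t)).filter (fun iv => cond iv.1)).map (·.2)).sum
        = ((ps.filter cond).map (fun j => full.getD (pvRnk j) 0)).sum := by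
  intro ps
  induction ps with
  | nil => intro t _ _; rfl
  | cons j ps ih =>
    intro t hlen hrnk
    have ht : t < full.length := by simp at hlen; omega
    rw [List.drop_eq_getElem_cons ht]
    rw [List.zip_cons_cons, List.filter_cons, List.filter_cons]
    have hr0 : pvRnk j = t := by
      have := hrnk 0 (by simp)
      simpa using this
    have ihh := ih (t + 1) (by simp at hlen ⊢; omega) (by
      intro idx hidx
      have := hrnk (idx + 1) (by simp; omega)
      simpa [Nat.add_assoc, Nat.add_comm 1 idx] using this)
    rcases h : cond j with _ | _
    · simp only [h, Bool.false_eq_true, if_false]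
      exact ihh
    · simp only [h, if_true]
      rw [List.map_cons, List.map_cons, List.sum_cons,
        List.sum_cons, ihh, hr0, List.getD_eq_getElem _ _ ht]

theorem map_iv_getD (ds : List String) (q : Nat) :
    (ds.map pvIv).getD q 0 = pvIv (ds.getD q "0") := by
  have h0 : pvIv "0" = 0 := by decide
  by_cases h : q < ds.length
  · rw [List.getD_eq_getElem _ _ (by simpa using h), List.getD_eq_getElem _ _ h]
    simp
  · rw [List.getD_eq_default _ _ (by simpa using h), List.getD_eq_default _ _ (by omega)]
    exact h0.symm

theorem iv_toStr_mod (c : Int) :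
    pvIv (PySem.Int.toStr (PySem.Int.mod c 2)) = PySem.Int.mod c 2 := by
  have h0 : (0 : Int) ≤ PySem.Int.mod c 2 := PySem.Int.mod_nonneg c (by omega)
  have h1 : PySem.Int.mod c 2 < 2 := PySem.Int.mod_lt c (by omega)
  interval_cases h : PySem.Int.mod c 2 <;> decide

-- B's inner loop over range r updating the counts vector
theorem set_map_range {α : Type} (f : Nat → α) (n q : Nat) (v : α) (hq : q < n) :
    ((List.range n).map f).set q v = (List.range n).map (fun j => if j = q then v else f j) := by
  rw [List.range_eq_range']
  have := set_map_range' f 0 n q v hq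
  simpa using this

theorem inner_go (r : Nat) (cond : Nat → Bool) (v : Int) :
    ∀ (t : Nat), t ≤ r → ∀ (F : Nat → Int),
      (List.range t).foldl (fun cs k => if cond k then cs.set k (cs.getD k 0 + v) else cs)
          ((List.range r).map F)
        = (List.range r).map (fun k => if decide (k < t) && cond k then F k + v else F k) := by
  intro t
  induction t with
  | zero =>
    intro _ F
    simp
  | succ t ih =>
    intro ht F
    rw [List.range_succ, List.foldl_append, ih (by omega) F]
    simp only [List.foldl_cons, List.foldl_nil]
    have htr : t < r := by omega
    have hget : ((List.range r).map (fun k => if decide (k < t) && cond k then F k + v else F k)).getD t 0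
        = F t := by
      rw [List.getD_eq_getElem _ _ (by simpa using htr)]
      simp
    rcases hc : cond t with _ | _
    · simp only [hc, Bool.false_eq_true, if_false]
      apply List.map_congr_left
      intro k _
      by_cases hkt : k = t
      · subst hkt; simp [hc]
      · have hdec : decide (k < t) = decide (k < t + 1) := by
          simp only [decide_eq_decide]; omega
        rw [hdec]
    · simp only [hc, if_true, hget]
      rw [set_map_range _ r t _ htr]
      apply List.map_congr_left
      intro k hk
      simp only [List.mem_range] at hk
      by_cases hkt : k = t
      · subst hkt
        simp [hc]
      · rw [if_neg hkt]
        have hdec : decide (k < t) = decide (k < t + 1) := by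
          simp only [decide_eq_decide]; omega
        rw [hdec]

theorem counts_go (r : Nat) :
    ∀ (pr : List (Nat × Int)) (F : Nat → Int),
      pr.foldl
          (fun (cs : List Int) iv =>
            (List.range r).foldl
              (fun cs k => if (iv.1 >>> k) &&& 1 == 1 then cs.set k (cs.getD k 0 + iv.2) else cs) cs)
          ((List.range r).map F)
        = (List.range r).map (fun k => F k + pvSsum pr k) := by
  intro pr
  induction pr with
  | nil =>
    intro F
    simp [pvSsum]
  | cons p pr ih =>
    intro F
    rw [List.foldl_cons, inner_go r (fun k => (p.1 >>> k) &&& 1 == 1) p.2 r le_rfl F, ih]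
    apply List.map_congr_left
    intro k hk
    simp only [List.mem_range] at hk
    simp only [decide_eq_true_eq, hk, decide_true, Bool.true_and]
    unfold pvSsum
    rw [List.filter_cons]
    rcases hc : ((p.1 >>> k) &&& 1 == 1) with _ | _
    · simp [hc]
    · simp only [hc, if_true, List.map_cons, List.sum_cons]
      ring

-- A's placement loop
theorem range'_one_concat (t : Nat) : List.range' 1 (t + 1) = List.range' 1 t ++ [t + 1] := by
  have h0 := List.range'_concat (s := 1) (n := t) (step := 1)
  simp only [Nat.one_mul] at h0
  rw [h0]
  simp [Nat.add_comm]

theorem rnk_succ (t : Nat) : pvRnk (t + 2) = pvRnk (t + 1) + (if pvNp (t + 1) then 1 else 0) := by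
  unfold pvRnk
  have h21 : t + 2 - 1 = t + 1 := rfl
  rw [h21, range'_one_concat, List.countP_append]
  rcases h : pvNp (t + 1) with _ | _ <;>
    simp [List.countP, List.countP.go, show ((t+1) &&& t != 0) = pvNp (t+1) from rfl, h]

theorem place_go (ds : List String) (n : Nat) : ∀ t, t ≤ n →
    (List.range' 1 t).foldl
        (fun (st : List String × Nat) i =>
          if i &&& (i - 1) == 0 then st
          else (st.1.set i (ds.getD st.2 "0"), st.2 + 1)) (List.replicate (n + 1) "0", 0)
      = ("0" :: ((List.range' 1 t).map (pvG1 ds) ++ List.replicate (n - t) "0"), pvRnk (t + 1)) := by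
  intro t
  induction t with
  | zero =>
    intro _
    simp [pvRnk, List.replicate_succ]
  | succ t ih =>
    intro ht
    rw [range'_one_concat, List.foldl_append, ih (by omega)]
    simp only [List.foldl_cons, List.foldl_nil]
    have hlen : ((List.range' 1 t).map (pvG1 ds)).length = t := by simp
    have hrep : List.replicate (n - t) "0" = "0" :: List.replicate (n - (t + 1)) "0" := by
      rw [show n - t = (n - (t + 1)) + 1 by omega, List.replicate_succ]
    rw [List.map_append, List.map_singleton]
    rcases h : pvPw (t + 1) with _ | _
    · -- data position: the set writes ds[rnk (t+1)] right after the mapped prefix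
      have h' : ((t + 1) &&& (t + 1 - 1) == 0) = false := h
      simp only [h', Bool.false_eq_true, if_false]
      have hg : pvG1 ds (t + 1) = ds.getD (pvRnk (t + 1)) "0" := by simp [pvG1, h]
      simp only [Prod.mk.injEq]
      refine ⟨?_, ?_⟩
      · rw [show (t + 1) = (List.length ((List.range' 1 t).map (pvG1 ds))) + 1 by simp]
        simp only [List.set_cons_succ]
        rw [List.set_append_right _ _ (by omega), hrep]
        simp only [hlen, Nat.sub_self, List.set_cons_zero]
        simp [hg, List.append_assoc]
      · rw [rnk_succ]
        simp [pvNp, pvPw] at h ⊢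
        omega
    · have h' : ((t + 1) &&& (t + 1 - 1) == 0) = true := h
      simp only [h', if_true]
      have hg : pvG1 ds (t + 1) = "0" := by simp [pvG1, h]
      simp only [Prod.mk.injEq]
      refine ⟨?_, ?_⟩
      · rw [hrep, hg]
        simp [List.append_assoc]
      · rw [rnk_succ]
        simp [pvNp, pvPw] at h ⊢
        omega


-- A's parity loop
theorem parity_go (ds : List String) (r n : Nat) (hlow : ∀ l, l < r → 2 ^ l ≤ n) :
    ∀ i, i ≤ r →
      (List.range i).foldl
          (fun h i' =>
            h.set (2 ^ i')
              (PySem.Int.toStr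
                (PySem.Int.mod
                  ((List.range' 1 n).foldl
                    (fun (c : Int) j =>
                      if j &&& 2 ^ i' != 0 then c + ((PySem.Int.ofStr? (h.getD j "0")).getD 0) else c) 0)
                  2)))
          ("0" :: (List.range' 1 n).map (pvG1 ds))
        = "0" :: (List.range' 1 n).map (pvGS ds n i) := by
  intro i
  induction i with
  | zero =>
    intro _
    simp only [List.range_zero, List.foldl_nil]
    congr 1
    apply List.map_congr_left
    intro j hj
    simp [pvGS]
  | succ i ih =>
    intro hi
    rw [List.range_succ, List.foldl_append, ih (by omega)]
    simp only [List.foldl_cons, List.foldl_nil]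
    have h2i : 2 ^ i ≤ n := hlow i (by omega)
    have h2i1 : 1 ≤ 2 ^ i := Nat.one_le_two_pow
    -- step 1: the count computed at stage i is pvCval ds n i
    have hcount :
        ((List.range' 1 n).foldl
          (fun (c : Int) j =>
            if j &&& 2 ^ i != 0 then
              c + ((PySem.Int.ofStr? (("0" :: (List.range' 1 n).map (pvGS ds n i)).getD j "0")).getD 0)
            else c) 0)
        = pvCval ds n i := by
      have hcongr := PySem.List.foldl_congr_mem
        (l := List.range' 1 n) (init := (0 : Int))
        (f := fun (c : Int) j =>
          if j &&& 2 ^ i != 0 then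
            c + ((PySem.Int.ofStr? (("0" :: (List.range' 1 n).map (pvGS ds n i)).getD j "0")).getD 0)
          else c)
        (g := fun (c : Int) j => c + (if j &&& 2 ^ i != 0 then pvIv (pvG1 ds j) else 0))
        (by
          intro acc x hx
          rw [List.mem_range'_1] at hx
          beta_reduce
          rw [cons_map_getD _ _ _ n x (by omega) (by omega)]
          rcases hb : (x &&& 2 ^ i != 0) with _ | _
          · simp [hb]
          · simp only [hb, if_true]
            congr 1
            show pvIv (pvGS ds n i x) = pvIv (pvG1 ds x)
            unfold pvGS
            rcases hp : (pvPw x && decide (Nat.log2 x < i)) with _ | _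
            · simp [hp]
            · -- x is a power 2^l with l < i, but x has bit i set: impossible
              exfalso
              simp only [Bool.and_eq_true, decide_eq_true_eq] at hp
              obtain ⟨hpw, hlt⟩ := hp
              have hx2 : x = 2 ^ Nat.log2 x := pvPw_eq_two_pow_log2 x (by omega) hpw
              rw [and_two_pow_ne] at hb
              rw [hx2, Nat.testBit_two_pow] at hb
              simp at hb
              omega)
      rw [hcongr, PySem.List.foldl_add]
      simp [pvCval]
    rw [hcount]
    -- step 2: the set at position 2^i updates the map to stage i+1
    have hset : ("0" :: (List.range' 1 n).map (pvGS ds n i)).set (2 ^ i) (PySem.Int.toStr (PySem.Int.mod (pvCval ds n i) 2))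
        = "0" :: ((List.range' 1 n).map (pvGS ds n i)).set (2 ^ i - 1) (PySem.Int.toStr (PySem.Int.mod (pvCval ds n i) 2)) := by
      rw [show 2 ^ i = (2 ^ i - 1) + 1 by omega]
      rfl
    rw [hset, set_map_range' _ 1 n (2 ^ i - 1) _ (by omega)]
    congr 1
    apply List.map_congr_left
    intro j hj
    rw [List.mem_range'_1] at hj
    have hj1 : 1 ≤ j := hj.1
    by_cases hje : j = 1 + (2 ^ i - 1)
    · have hj2 : j = 2 ^ i := by omega
      rw [if_pos hje]
      unfold pvGS
      rw [hj2, pvPw_two_pow, Nat.log2_two_pow]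
      simp [pvPstr]
    · rw [if_neg hje]
      unfold pvGS
      have hlog : pvPw j = true → ¬ (Nat.log2 j = i) := by
        intro hpw hli
        have := pvPw_eq_two_pow_log2 j (by omega) hpw
        rw [hli] at this
        omega
      rcases hpw : pvPw j with _ | _
      · simp
      · have hne := hlog hpw
        have : (decide (Nat.log2 j < i)) = (decide (Nat.log2 j < i + 1)) := by
          simp only [decide_eq_decide]
          omega
        rw [this]


-- B's assembly loop
theorem drop_headD (ds : List String) (q : Nat) : (ds.drop q).headD "0" = ds.getD q "0" := by
  rw [List.headD_eq_head?_getD, List.head?_drop, List.getD_eq_getElem?_getD]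

theorem pieces_go (ds par : List String) (n : Nat) : ∀ t, t ≤ n →
    (List.range' 1 t).foldl
        (fun (st : List String × List String) i =>
          if i &&& (i - 1) == 0 then (st.1 ++ [par.getD (Nat.log2 i) "0"], st.2)
          else (st.1 ++ [st.2.headD "0"], st.2.tail)) ([], ds)
      = ((List.range' 1 t).map
            (fun j => if pvPw j then par.getD (Nat.log2 j) "0" else ds.getD (pvRnk j) "0"),
          ds.drop (pvRnk (t + 1))) := by
  intro t
  induction t with
  | zero =>
    intro _
    simp [pvRnk]
  | succ t ih =>
    intro ht
    rw [range'_one_concat, List.foldl_append, ih (by omega)]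
    simp only [List.foldl_cons, List.foldl_nil, List.map_append, List.map_singleton]
    rcases h : pvPw (t + 1) with _ | _
    · have h' : ((t + 1) &&& (t + 1 - 1) == 0) = false := h
      have hnp : pvNp (t + 1) = true := by
        rw [show pvNp (t + 1) = !pvPw (t + 1) from rfl, h]; rfl
      simp only [h', Bool.false_eq_true, if_false, Prod.mk.injEq]
      refine ⟨?_, ?_⟩
      · rw [drop_headD]
      · rw [List.tail_drop, rnk_succ, hnp]
        simp
    · have h' : ((t + 1) &&& (t + 1 - 1) == 0) = true := h
      have hnp : pvNp (t + 1) = false := by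
        rw [show pvNp (t + 1) = !pvPw (t + 1) from rfl, h]; rfl
      simp only [h', if_true, Prod.mk.injEq]
      refine ⟨by simp [h], ?_⟩
      rw [rnk_succ, hnp]
      simp


-- the per-parity count A computes equals the per-parity sum B accumulates
theorem Cval_eq_Ssum (ds : List String) (n k : Nat)
    (hlen : ((List.range' 1 n).filter pvNp).length = ds.length) :
    pvCval ds n k = pvSsum (((List.range' 1 n).filter pvNp).zip (ds.map pvIv)) k := by
  unfold pvSsum
  have hz := zipsum (ds.map pvIv) (fun j => (j >>> k) &&& 1 == 1)
      ((List.range' 1 n).filter pvNp) 0 (by simp [hlen]) (by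
        intro idx h
        simpa using rnk_filter_idx n idx h)
  rw [List.drop_zero] at hz
  rw [hz]
  unfold pvCval
  have hpoint : ∀ j ∈ List.range' 1 n,
      (if j &&& 2 ^ k != 0 then pvIv (pvG1 ds j) else 0)
        = (if ((j >>> k) &&& 1 == 1) && pvNp j then (ds.map pvIv).getD (pvRnk j) 0 else 0) := by
    intro j _
    rw [and_two_pow_ne, ← shift_and_one j k]
    rcases hc : ((j >>> k) &&& 1 == 1) with _ | _
    · simp
    · simp only [Bool.true_and, if_true]
      unfold pvG1
      rcases hp : pvPw j with _ | _
      · have hnp : pvNp j = true := by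
          rw [show pvNp j = !pvPw j from rfl, hp]; rfl
        rw [hnp, map_iv_getD]
        simp [hp]
      · have hnp : pvNp j = false := by
          rw [show pvNp j = !pvPw j from rfl, hp]; rfl
        rw [hnp]
        simp only [hp, if_true, Bool.and_false, Bool.false_eq_true, if_false]
        decide
  rw [List.map_congr_left hpoint, sum_if_filter]
  congr 1
  rw [← List.filter_filter]


theorem main_eq (ds : List String) : calculate_hamming ds = calculate_hamming_alt ds := by
  obtain ⟨hlow', hhi'⟩ := findR_A_spec ds.length
  simp only [calculate_hamming, calculate_hamming_alt]
  set r := findR_A ds.length (ds.length + 2) 0 with hrdef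
  set n := ds.length + r with hndef
  have hlow : ∀ l, l < r → 2 ^ l ≤ n := by
    intro l hl
    have := hlow' l hl
    omega
  have hhi : n < 2 ^ r := by omega
  have hlen : ((List.range' 1 n).filter pvNp).length = ds.length := by
    rw [length_filter_np r n hlow hhi]
    have : r ≤ n := by
      rcases Nat.eq_zero_or_pos r with h0 | h0
      · omega
      · have := hlow (r - 1) (by omega)
        have h2 : r - 1 < 2 ^ (r - 1) := Nat.lt_two_pow_self
        omega
    omega
  -- A side: placement, parity loop, drop
  rw [place_go ds n n le_rfl]
  simp only [Nat.sub_self, List.replicate_zero, List.append_nil]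
  rw [parity_go ds r n hlow r le_rfl]
  simp only [List.drop_succ_cons, List.drop_zero]
  -- B side: counts, parity list, pieces
  have hrep : List.replicate r (0 : Int) = (List.range r).map (fun _ => 0) := by
    simp [List.map_const']
  rw [hrep, counts_go r, pieces_go ds _ n n le_rfl]
  simp only [zero_add, List.map_map]
  -- the two bit strings coincide
  have hmaps : (List.range' 1 n).map (pvGS ds n r)
      = (List.range' 1 n).map (fun j =>
          if pvPw j then
            ((List.range r).map
              (fun k => PySem.Int.toStr (PySem.Int.mod
                (pvSsum (((List.range' 1 n).filter pvNp).zip (ds.map pvIv)) k) 2))).getD (Nat.log2 j) "0"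
          else ds.getD (pvRnk j) "0") := by
    apply List.map_congr_left
    intro j hj
    rw [List.mem_range'_1] at hj
    unfold pvGS
    rcases hp : pvPw j with _ | _
    · simp [pvG1, hp]
    · have hlog : Nat.log2 j < r := (Nat.log2_lt (by omega)).mpr (by omega)
      simp only [hp, Bool.true_and, decide_eq_true_eq, if_pos hlog]
      rw [List.getD_eq_getElem _ _ (by simpa using hlog)]
      simp only [List.getElem_map, List.getElem_range]
      unfold pvPstr
      rw [Cval_eq_Ssum ds n (Nat.log2 j) hlen]
      simp
  -- the two totals coincide
  have hsums :
      ((List.range' 1 n).map (pvGS ds n r)).foldl (fun (c : Int) s => c + ((PySem.Int.ofStr? s).getD 0)) 0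
        = ((List.range r).map (fun k => pvSsum (((List.range' 1 n).filter pvNp).zip (ds.map pvIv)) k)).foldl
            (fun (a : Int) c => a + PySem.Int.mod c 2) 0
          + ((((List.range' 1 n).filter pvNp).zip (ds.map pvIv)).foldl (fun (a : Int) iv => a + iv.2) 0) := by
    rw [PySem.List.foldl_add, PySem.List.foldl_add, PySem.List.foldl_add]
    simp only [zero_add, List.map_map]
    have hpoint : (List.range' 1 n).map ((fun s => (PySem.Int.ofStr? s).getD 0) ∘ pvGS ds n r)
        = (List.range' 1 n).map (fun j =>
            if pvPw j then PySem.Int.mod (pvCval ds n (Nat.log2 j)) 2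
            else (ds.map pvIv).getD (pvRnk j) 0) := by
      apply List.map_congr_left
      intro j hj
      rw [List.mem_range'_1] at hj
      simp only [Function.comp]
      unfold pvGS
      rcases hp : pvPw j with _ | _
      · simp only [hp, Bool.false_and, Bool.false_eq_true, if_false]
        unfold pvG1
        rw [if_neg (by simp [hp]), map_iv_getD]
        rfl
      · have hlog : Nat.log2 j < r := (Nat.log2_lt (by omega)).mpr (by omega)
        simp only [hp, Bool.true_and, decide_eq_true_eq, if_pos hlog]
        unfold pvPstr
        exact iv_toStr_mod _
    rw [hpoint, sum_split]
    congr 1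
    · -- parity-position part
      have hfpw : (List.range' 1 n).filter pvPw = (List.range r).map (2 ^ ·) := by
        rw [show (List.range' 1 n).filter pvPw
            = (List.range' 1 n).filter (fun i => i &&& (i - 1) == 0) from rfl]
        exact filter_pw_eq r n hlow hhi
      rw [hfpw, List.map_map]
      apply congrArg
      apply List.map_congr_left
      intro k hk
      simp only [Function.comp, Nat.log2_two_pow]
      rw [Cval_eq_Ssum ds n k hlen]
    · -- data-position part
      have hfnp : (List.range' 1 n).filter (fun j => !pvPw j) = (List.range' 1 n).filter pvNp := by
        apply List.filter_congr
        intro a _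
        rw [show pvNp a = !pvPw a from rfl]
      rw [hfnp]
      have hz := zipsum (ds.map pvIv) (fun _ => true)
          ((List.range' 1 n).filter pvNp) 0 (by simp [hlen]) (by
            intro idx h
            simpa using rnk_filter_idx n idx h)
      rw [List.drop_zero] at hz
      simp only [List.filter_true] at hz
      exact hz.symm
  rw [hmaps] at *
  rw [hsums]
  rfl


-- ===== VERDICT (by name: the statement is the Claim_ definition above) =====
theorem calculate_hamming_spec : Claim_equal_calculate_hamming := by
  intro ds _ _
  exact main_eq ds
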